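-- pv_equiv track=rewrite | github.com/biancaene/ironhack_project_chatbot | src/agent/index_data.py | estimate_timestamps
-- ===== SOURCE A (Python) =====
-- def estimate_timestamps(chunk, entries):
--     start_time = "unknown"
--     end_time = "unknown"
--
--     for e in entries:
--         if e["text"][:40] in chunk:
--             start_time = e["timestamp"]
--             break
--
--     for e in reversed(entries):
--         if e["text"][:40] in chunk:
--             end_time = e["timestamp"]
--             break
--
--     return start_time, end_time
-- ===== SOURCE B (Python) =====
-- def estimate_timestamps(chunk, entries):
--     start = None
--     end = None
--     for e in entries:
--         if e["text"][:40] in chunk: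
--             if start is None:
--                 start = e["timestamp"]
--             end = e["timestamp"]
--     return (start if start is not None else "unknown",
--             end if end is not None else "unknown")
-- ===== Notes on version B (the rewrite author's own statement) =====
-- stated objective: simpler
-- what changed: The two early-breaking scans (forward for the first match, reversed for the last) are replaced by one forward pass that records the first match's timestamp once and keeps overwriting the last match's timestamp.
import Mathlib
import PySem

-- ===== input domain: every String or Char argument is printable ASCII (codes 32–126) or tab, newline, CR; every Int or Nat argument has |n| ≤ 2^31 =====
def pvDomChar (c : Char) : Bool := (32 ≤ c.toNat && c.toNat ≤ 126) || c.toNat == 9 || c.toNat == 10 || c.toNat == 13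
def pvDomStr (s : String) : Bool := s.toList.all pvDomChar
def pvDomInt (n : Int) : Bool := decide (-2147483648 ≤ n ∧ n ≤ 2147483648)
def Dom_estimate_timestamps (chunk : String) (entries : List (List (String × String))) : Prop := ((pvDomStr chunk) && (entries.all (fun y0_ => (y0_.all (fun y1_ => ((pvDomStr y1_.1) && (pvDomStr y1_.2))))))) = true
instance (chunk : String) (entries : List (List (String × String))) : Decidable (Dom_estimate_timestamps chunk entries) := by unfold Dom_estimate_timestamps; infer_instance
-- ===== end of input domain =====

-- B replaces A's two early-breaking scans (forward + reversed) with one forward pass; objective: simpler.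

-- ===== PORT A =====
-- shared test 'e["text"][:40] in chunk' (the identical expression in both Pythons)
def pvMatch (chunk : String) (e : List (String × String)) : Bool :=
  PySem.Str.isIn (PySem.Str.slice (PySem.Dict.getD (PySem.Dict.mk e) "text" "") none (some 40)) chunk

-- one of A's early-breaking 'for e in …: if …: t = e["timestamp"]; break' loops
-- (applied to entries and to entries.reverse; e["timestamp"] via getD — exact under Pre_, where the key is present)
def pvScanA (chunk : String) : List (List (String × String)) → String
  | [] => "unknown"
  | e :: rest => if pvMatch chunk e then PySem.Dict.getD (PySem.Dict.mk e) "timestamp" "" else pvScanA chunk rest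

def estimate_timestamps (chunk : String) (entries : List (List (String × String))) : String × String :=
  (pvScanA chunk entries, pvScanA chunk entries.reverse)

-- ===== PORT B =====
-- one forward pass: (first match's timestamp kept, last match's timestamp overwritten)
def pvStepB (chunk : String) (p : Option String × Option String) (e : List (String × String)) :
    Option String × Option String :=
  if pvMatch chunk e then
    (if p.1.isNone then some (PySem.Dict.getD (PySem.Dict.mk e) "timestamp" "") else p.1,
     some (PySem.Dict.getD (PySem.Dict.mk e) "timestamp" ""))
  else p

def estimate_timestamps_alt (chunk : String) (entries : List (List (String × String))) : String × String :=
  let st := entries.foldl (pvStepB chunk) (none, none)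
  (st.1.getD "unknown", st.2.getD "unknown")

-- ===== PRECONDITION & SPEC =====
-- Pre_ excludes inputs where some entry lacks the "text" key, or a MATCHING entry lacks the
-- "timestamp" key: there Python A raises KeyError, except when only a matching entry strictly
-- between the first and last match lacks "timestamp" — A accidentally never reads that key and
-- returns, while B (which reads every matching entry's timestamp) raises KeyError.
def Pre_estimate_timestamps (chunk : String) (entries : List (List (String × String))) : Prop :=
  entries.all (fun e => PySem.Dict.contains (PySem.Dict.mk e) "text" &&
    (!(pvMatch chunk e) || PySem.Dict.contains (PySem.Dict.mk e) "timestamp")) = true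
instance (chunk : String) (entries : List (List (String × String))) : Decidable (Pre_estimate_timestamps chunk entries) := by unfold Pre_estimate_timestamps; infer_instance

def pvWitness_estimate_timestamps : String × (List (List (String × String))) :=
  ("hello world", [[("text", "hello"), ("timestamp", "00:01")], [("text", "zzz"), ("timestamp", "00:02")]])

def Spec_estimate_timestamps (chunk : String) (entries : List (List (String × String))) (out : String × String) : Prop := out = estimate_timestamps_alt chunk entries
instance (chunk : String) (entries : List (List (String × String))) (out : String × String) : Decidable (Spec_estimate_timestamps chunk entries out) := by unfold Spec_estimate_timestamps; infer_instance

-- ===== CLAIM (what is proved, stated in full; the proofs are below) =====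
def Claim_equal_estimate_timestamps : Prop := ∀ (chunk : String) (entries : List (List (String × String))), Dom_estimate_timestamps chunk entries → Pre_estimate_timestamps chunk entries → Spec_estimate_timestamps chunk entries (estimate_timestamps chunk entries)

-- ===== LEMMAS AND PROOFS =====

-- first matching entry's timestamp, as an Option
def pvFirst? (chunk : String) : List (List (String × String)) → Option String
  | [] => none
  | e :: rest => if pvMatch chunk e then some (PySem.Dict.getD (PySem.Dict.mk e) "timestamp" "") else pvFirst? chunk rest

-- last matching entry's timestamp, folded forward from t
def pvLast? (chunk : String) (t : Option String) (l : List (List (String × String))) : Option String :=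
  l.foldl (fun t e => if pvMatch chunk e then some (PySem.Dict.getD (PySem.Dict.mk e) "timestamp" "") else t) t

theorem pvScanA_eq_first (chunk : String) (l : List (List (String × String))) :
    pvScanA chunk l = (pvFirst? chunk l).getD "unknown" := by
  induction l with
  | nil => rfl
  | cons e rest ih =>
      simp only [pvScanA, pvFirst?]
      split <;> simp [ih]

theorem foldB_some (chunk : String) (l : List (List (String × String))) (a : String) (t : Option String) :
    l.foldl (pvStepB chunk) (some a, t) = (some a, pvLast? chunk t l) := by
  induction l generalizing t with
  | nil => rfl
  | cons e rest ih =>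
      simp only [List.foldl_cons, pvStepB, pvLast?, Option.isNone_some]
      split <;> simp [ih, pvLast?]

theorem foldB_none (chunk : String) (l : List (List (String × String))) (t : Option String) :
    l.foldl (pvStepB chunk) (none, t) = (pvFirst? chunk l, pvLast? chunk t l) := by
  induction l generalizing t with
  | nil => rfl
  | cons e rest ih =>
      simp only [List.foldl_cons, pvStepB, pvFirst?, pvLast?, Option.isNone_none]
      split <;> simp [ih, foldB_some, pvLast?]

theorem pvLast?_none_eq_first_reverse (chunk : String) (l : List (List (String × String))) :
    pvLast? chunk none l = pvFirst? chunk l.reverse := by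
  induction l using List.reverseRecOn with
  | nil => rfl
  | append_singleton l e ih =>
      simp only [pvLast?, List.foldl_append, List.foldl_cons, List.foldl_nil,
        List.reverse_append, List.reverse_cons, List.reverse_nil, List.nil_append,
        List.singleton_append, pvFirst?]
      split <;> simp [← ih, pvLast?]

-- ===== VERDICT (by name: the statement is the Claim_ definition above) =====
theorem estimate_timestamps_spec : Claim_equal_estimate_timestamps := by
  intro chunk entries _ _
  unfold Spec_estimate_timestamps estimate_timestamps estimate_timestamps_alt
  simp [foldB_none, pvScanA_eq_first, pvLast?_none_eq_first_reverse]
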